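-- pv_equiv track=rewrite | github.com/amlluch/vectorai | vectorai/restapi/utils.py | _calc
-- ===== SOURCE A (Python) =====
-- def _calc(data):
--     digit_weight = '0123456789ABCDEFGHIJKLMNOPQRSTUVWXYZ'
--     pos_weight = '731'
--     data = data.upper()
--     value = 0
--     for i in range(len(data)):
--         digitw = digit_weight.find(data[i])
--         if digitw < 0:
--             digitw = 0
--         posw = int(pos_weight[(i+1)%3-1])
--         value += digitw*posw
--
--     return value%10
-- ===== SOURCE B (Python) =====
-- def _calc(data):
--     table = '0123456789ABCDEFGHIJKLMNOPQRSTUVWXYZ'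
--
--     def val(c):
--         i = table.find(c)
--         return 0 if i < 0 else i
--
--     chars = data.upper()
--     total = 0
--     i = 0
--     while i < len(chars):
--         head = chars[i:i + 3]
--         total += sum(w * val(c) for w, c in zip((7, 3, 1), head))
--         i += 3
--     return total % 10
-- ===== Notes on version B (the rewrite author's own statement) =====
-- stated objective: alternative
-- what changed: Replaces the per-index loop, whose weight comes from indexing the three-character weight string at (i+1)%3-1 (a negative index every third step) and parsing that digit with int(), by a pass that consumes the uppercased data in chunks of three characters, zipping each chunk against the fixed weights (7, 3, 1); no index arithmetic, negative indexing or digit parsing remains.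
import Mathlib
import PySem

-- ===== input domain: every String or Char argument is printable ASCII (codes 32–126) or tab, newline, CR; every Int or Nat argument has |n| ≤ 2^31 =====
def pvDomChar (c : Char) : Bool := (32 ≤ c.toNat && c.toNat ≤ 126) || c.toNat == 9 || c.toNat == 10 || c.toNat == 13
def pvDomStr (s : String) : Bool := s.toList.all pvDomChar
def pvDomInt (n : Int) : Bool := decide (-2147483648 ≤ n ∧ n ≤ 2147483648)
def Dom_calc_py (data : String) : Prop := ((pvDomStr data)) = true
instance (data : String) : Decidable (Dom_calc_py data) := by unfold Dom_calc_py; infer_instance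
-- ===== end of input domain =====

-- B replaces A's index loop + modular weight-string lookup by a pass consuming the
-- uppercased characters three at a time against the fixed weights (7,3,1): alternative decomposition, same cost.

-- ===== PORT A =====
-- literal transliteration of A's single indexed loop ('data[i]' is always in range,
-- so pyGetD's defaults are never used; likewise ofChars? always parses a digit of '731')
def calc_py (data : String) : Int :=
  let digit_weight := "0123456789ABCDEFGHIJKLMNOPQRSTUVWXYZ".toList
  let pos_weight := "731".toList
  let d := PySem.Chars.upper data.toList
  let value := (PySem.List.pyRange 0 (d.length : Int)).foldl
    (fun value i =>
      let digitw0 := PySem.Chars.find digit_weight [PySem.List.pyGetD d i ' ']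
      let digitw := if digitw0 < 0 then 0 else digitw0
      let posw := (PySem.Int.ofChars? [PySem.List.pyGetD pos_weight (PySem.Int.mod (i + 1) 3 - 1) ' ']).getD 0
      value + digitw * posw) 0
  PySem.Int.mod value 10

-- ===== PORT B =====
def pvVal (c : Char) : Int :=
  let i := PySem.Chars.find "0123456789ABCDEFGHIJKLMNOPQRSTUVWXYZ".toList [c]
  if i < 0 then 0 else i

-- the while loop: take a chunk of at most 3 chars, add its zip with (7,3,1), recurse on the rest
def pvChunks : List Char → Int
  | [] => 0
  | [a] => 7 * pvVal a
  | [a, b] => 7 * pvVal a + 3 * pvVal b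
  | a :: b :: c :: rest => (7 * pvVal a + 3 * pvVal b + 1 * pvVal c) + pvChunks rest

def calc_py_alt (data : String) : Int :=
  PySem.Int.mod (pvChunks (PySem.Chars.upper data.toList)) 10

-- ===== PRECONDITION & SPEC =====
def Spec_calc_py (data : String) (out : Int) : Prop := out = calc_py_alt data
instance (data : String) (out : Int) : Decidable (Spec_calc_py data out) := by unfold Spec_calc_py; infer_instance

-- ===== CLAIM (what is proved, stated in full; the proofs are below) =====
def Claim_equal_calc_py : Prop := ∀ (data : String), Dom_calc_py data → Spec_calc_py data (calc_py data)

-- ===== LEMMAS AND PROOFS =====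

-- the weight A looks up for index i, as a function of i % 3
def pvW (r : Nat) : Int := if r = 0 then 7 else if r = 1 then 3 else 1

lemma pv_posw (i : Nat) :
    (PySem.Int.ofChars? [PySem.List.pyGetD "731".toList (PySem.Int.mod ((i : Int) + 1) 3 - 1) ' ']).getD 0
      = pvW (i % 3) := by
  have h1 : ((i : Int) + 1) = ((i + 1 : Nat) : Int) := by push_cast; ring
  rw [h1, show ((3:Int)) = ((3:Nat):Int) from rfl, PySem.Int.mod_natCast]
  have h2 : (i + 1) % 3 = (i % 3 + 1) % 3 := by omega
  have h3 : i % 3 = 0 ∨ i % 3 = 1 ∨ i % 3 = 2 := by omega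
  rcases h3 with h | h | h <;> rw [h2, h] <;> decide

-- the per-index summand of A's loop over a list l
lemma pv_sum_eq (l : List Char) :
    ((List.range l.length).map
      (fun i => (if PySem.Chars.find "0123456789ABCDEFGHIJKLMNOPQRSTUVWXYZ".toList [l.getD i ' '] < 0 then 0
                 else PySem.Chars.find "0123456789ABCDEFGHIJKLMNOPQRSTUVWXYZ".toList [l.getD i ' ']) * pvW (i % 3))).sum
      = pvChunks l := by
  induction l using pvChunks.induct with
  | case1 => simp [pvChunks]
  | case2 a => simp [pvChunks, pvVal, pvW, List.range_succ, mul_comm]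
  | case3 a b => simp [pvChunks, pvVal, pvW, List.range_succ, mul_comm]
  | case4 a b c rest ih =>
    have hlen : (a :: b :: c :: rest).length = 3 + rest.length := by simp; omega
    rw [hlen, List.range_add, List.map_append, List.sum_append]
    have hshift : (List.map (fun i => (if PySem.Chars.find "0123456789ABCDEFGHIJKLMNOPQRSTUVWXYZ".toList [(a :: b :: c :: rest).getD i ' '] < 0 then 0
                 else PySem.Chars.find "0123456789ABCDEFGHIJKLMNOPQRSTUVWXYZ".toList [(a :: b :: c :: rest).getD i ' ']) * pvW (i % 3))
              (List.map (fun x => 3 + x) (List.range rest.length)))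
        = (List.map (fun i => (if PySem.Chars.find "0123456789ABCDEFGHIJKLMNOPQRSTUVWXYZ".toList [rest.getD i ' '] < 0 then 0
                 else PySem.Chars.find "0123456789ABCDEFGHIJKLMNOPQRSTUVWXYZ".toList [rest.getD i ' ']) * pvW (i % 3))
              (List.range rest.length)) := by
      rw [List.map_map]
      refine List.map_congr_left ?_
      intro i _
      have : 3 + i = i + 3 := by omega
      simp [Function.comp, this, Nat.add_mod_right, List.getD]
    rw [hshift, ih]
    simp [pvChunks, pvVal, pvW, List.range_succ, mul_comm]
    ring

lemma pv_value_eq (l : List Char) :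
    (PySem.List.pyRange 0 (l.length : Int)).foldl
      (fun value i =>
        let digitw0 := PySem.Chars.find "0123456789ABCDEFGHIJKLMNOPQRSTUVWXYZ".toList [PySem.List.pyGetD l i ' ']
        let digitw := if digitw0 < 0 then 0 else digitw0
        let posw := (PySem.Int.ofChars? [PySem.List.pyGetD "731".toList (PySem.Int.mod (i + 1) 3 - 1) ' ']).getD 0
        value + digitw * posw) 0 = pvChunks l := by
  rw [PySem.List.foldl_add, PySem.List.pyRange_zero_natCast, List.map_map, zero_add]
  have hmap : ∀ i ∈ List.range l.length,
      ((fun i : Int =>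
        (if PySem.Chars.find "0123456789ABCDEFGHIJKLMNOPQRSTUVWXYZ".toList [PySem.List.pyGetD l i ' '] < 0 then 0
         else PySem.Chars.find "0123456789ABCDEFGHIJKLMNOPQRSTUVWXYZ".toList [PySem.List.pyGetD l i ' ']) *
          (PySem.Int.ofChars? [PySem.List.pyGetD "731".toList (PySem.Int.mod (i + 1) 3 - 1) ' ']).getD 0) ∘
        (fun k : Nat => (k : Int))) i
      = (if PySem.Chars.find "0123456789ABCDEFGHIJKLMNOPQRSTUVWXYZ".toList [l.getD i ' '] < 0 then 0
         else PySem.Chars.find "0123456789ABCDEFGHIJKLMNOPQRSTUVWXYZ".toList [l.getD i ' ']) * pvW (i % 3) := by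
    intro i _
    simp only [Function.comp, PySem.List.pyGetD_natCast, pv_posw i]
  rw [List.map_congr_left hmap, pv_sum_eq]

-- ===== VERDICT (by name: the statement is the Claim_ definition above) =====
theorem calc_py_spec : Claim_equal_calc_py := by
  intro data _
  unfold Spec_calc_py calc_py calc_py_alt
  simp only []
  rw [pv_value_eq]
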